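-- pv_equiv track=rewrite | github.com/Project-Phaistos/Ventris1 | pillar1/scripts/jaccard_independent_validation.py | build_japanese_ground_truth
-- ===== SOURCE A (Python) =====
-- from collections import Counter, defaultdict
--
-- def build_japanese_ground_truth(
--     signs: list[str],
--     sign_info: dict[str, dict[str, str]],
-- ) -> tuple[dict[str, int], dict[str, int]]:
--     """Build consonant and vowel ground-truth integer labels.
--
--     Returns (consonant_labels, vowel_labels) as dicts: sign -> int label.
--     """
--     # Collect unique consonant series and vowel classes
--     cons_series: dict[str, list[str]] = defaultdict(list)
--     vowel_classes: dict[str, list[str]] = defaultdict(list)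
--
--     for sign in signs:
--         if sign not in sign_info:
--             continue
--         c = sign_info[sign]["consonant"]
--         v = sign_info[sign]["vowel"]
--         cons_series[c].append(sign)
--         vowel_classes[v].append(sign)
--
--     # Assign integer labels
--     cons_label: dict[str, int] = {}
--     for idx, name in enumerate(sorted(cons_series.keys())):
--         for s in cons_series[name]:
--             cons_label[s] = idx
--
--     vowel_label: dict[str, int] = {}
--     for idx, name in enumerate(sorted(vowel_classes.keys())):
--         for s in vowel_classes[name]:
--             vowel_label[s] = idx
--
--     return cons_label, vowel_label
-- ===== SOURCE B (Python) =====
-- def build_japanese_ground_truth(signs, sign_info):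
--     """Build consonant and vowel ground-truth integer labels."""
--     valid = [s for s in signs if s in sign_info]
--
--     def labels(field):
--         keys = sorted({sign_info[s][field] for s in valid})
--         out = {}
--         for idx, k in enumerate(keys):
--             for s in valid:
--                 if sign_info[s][field] == k:
--                     out[s] = idx
--         return out
--
--     return labels("consonant"), labels("vowel")
-- ===== Notes on version B (the rewrite author's own statement) =====
-- stated objective: simpler
-- what changed: B drops the defaultdict bucket lists entirely: one pass collects the valid signs, a set comprehension yields the distinct keys, and for each sorted key a direct filtered pass over the valid signs assigns the rank, with a single helper shared by the consonant and vowel fields.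
import Mathlib
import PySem

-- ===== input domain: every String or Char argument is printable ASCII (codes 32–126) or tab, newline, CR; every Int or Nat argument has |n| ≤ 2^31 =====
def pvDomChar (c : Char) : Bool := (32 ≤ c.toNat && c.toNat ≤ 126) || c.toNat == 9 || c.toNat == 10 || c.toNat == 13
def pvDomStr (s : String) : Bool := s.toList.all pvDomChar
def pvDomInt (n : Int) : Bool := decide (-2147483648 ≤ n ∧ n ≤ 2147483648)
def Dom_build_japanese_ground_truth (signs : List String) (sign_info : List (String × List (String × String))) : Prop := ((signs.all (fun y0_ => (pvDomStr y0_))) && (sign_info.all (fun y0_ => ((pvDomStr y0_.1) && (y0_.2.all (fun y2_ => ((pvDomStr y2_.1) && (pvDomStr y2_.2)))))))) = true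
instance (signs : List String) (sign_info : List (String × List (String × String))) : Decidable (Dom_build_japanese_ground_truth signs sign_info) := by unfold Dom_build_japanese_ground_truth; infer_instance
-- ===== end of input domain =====

-- B replaces A's defaultdict bucket lists by a key set plus, per sorted key, a filtered pass over
-- the valid signs, factored into one helper shared by both fields (objective: simpler).


-- ===== PORT A =====
-- sign_info[sign][field]; the .getD "" defaults are only reached where Python raises KeyError,
-- which Pre_ excludes.
def pvField (sign_info : List (String × List (String × String))) (field : String) (s : String) : String :=
  ((PySem.Dict.mk (((PySem.Dict.mk sign_info).get? s).getD [])).get? field).getD ""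

def build_japanese_ground_truth (signs : List String) (sign_info : List (String × List (String × String))) : (List (String × Int)) × (List (String × Int)) :=
  let si := PySem.Dict.mk sign_info
  -- for sign in signs: if sign in sign_info: append sign to cons_series / vowel_classes buckets
  let bkts := signs.foldl
    (fun (st : PySem.Dict String (List String) × PySem.Dict String (List String)) sign =>
      if si.contains sign then
        (st.1.modify (pvField sign_info "consonant" sign) [] (fun l => l ++ [sign]),
         st.2.modify (pvField sign_info "vowel" sign) [] (fun l => l ++ [sign]))
      else st)
    (PySem.Dict.empty, PySem.Dict.empty)
  -- for idx, name in enumerate(sorted(keys)): for s in bucket[name]: label[s] = idx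
  let cons_label := (PySem.List.enumerate (PySem.List.sorted bkts.1.keys (fun x => x) false) 0).foldl
      (fun d p => (bkts.1.getD p.2 []).foldl (fun d s => d.insert s p.1) d)
      (PySem.Dict.empty : PySem.Dict String Int)
  let vowel_label := (PySem.List.enumerate (PySem.List.sorted bkts.2.keys (fun x => x) false) 0).foldl
      (fun d p => (bkts.2.getD p.2 []).foldl (fun d s => d.insert s p.1) d)
      (PySem.Dict.empty : PySem.Dict String Int)
  (cons_label.items, vowel_label.items)

-- ===== PORT B =====
-- labels(field): distinct keys of the valid signs, sorted; then per key one filtered pass.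
def pvLabels (sign_info : List (String × List (String × String))) (valid : List String) (field : String) : PySem.Dict String Int :=
  let keys := PySem.List.sorted (PySem.Set.ofList (valid.map (pvField sign_info field))) (fun x => x) false
  (PySem.List.enumerate keys 0).foldl
    (fun d p => valid.foldl (fun d s => if pvField sign_info field s == p.2 then d.insert s p.1 else d) d)
    (PySem.Dict.empty : PySem.Dict String Int)

def build_japanese_ground_truth_alt (signs : List String) (sign_info : List (String × List (String × String))) : (List (String × Int)) × (List (String × Int)) :=
  let valid := signs.filter (fun s => (PySem.Dict.mk sign_info).contains s)
  ((pvLabels sign_info valid "consonant").items, (pvLabels sign_info valid "vowel").items)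

-- ===== PRECONDITION & SPEC =====
-- Pre_ excludes exactly the inputs on which Python A raises KeyError: a sign present in sign_info
-- whose record lacks a "consonant" or "vowel" entry.
def Pre_build_japanese_ground_truth (signs : List String) (sign_info : List (String × List (String × String))) : Prop :=
  (signs.all (fun s =>
    match (PySem.Dict.mk sign_info).get? s with
    | none => true
    | some d => (PySem.Dict.mk d).contains "consonant" && (PySem.Dict.mk d).contains "vowel")) = true
instance (signs : List String) (sign_info : List (String × List (String × String))) : Decidable (Pre_build_japanese_ground_truth signs sign_info) := by unfold Pre_build_japanese_ground_truth; infer_instance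

def pvWitness_build_japanese_ground_truth : List String × (List (String × List (String × String))) :=
  (["pa", "ka", "pa", "mu"], [("pa", [("consonant", "p"), ("vowel", "a")]), ("ka", [("consonant", "k"), ("vowel", "a")])])

def Spec_build_japanese_ground_truth (signs : List String) (sign_info : List (String × List (String × String))) (out : (List (String × Int)) × (List (String × Int))) : Prop := out = build_japanese_ground_truth_alt signs sign_info
instance (signs : List String) (sign_info : List (String × List (String × String))) (out : (List (String × Int)) × (List (String × Int))) : Decidable (Spec_build_japanese_ground_truth signs sign_info out) := by unfold Spec_build_japanese_ground_truth; infer_instance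

-- ===== CLAIM (what is proved, stated in full; the proofs are below) =====
def Claim_equal_build_japanese_ground_truth : Prop := ∀ (signs : List String) (sign_info : List (String × List (String × String))), Dom_build_japanese_ground_truth signs sign_info → Pre_build_japanese_ground_truth signs sign_info → Spec_build_japanese_ground_truth signs sign_info (build_japanese_ground_truth signs sign_info)

-- ===== LEMMAS AND PROOFS =====

-- A's bucket for key k holds exactly the valid signs whose key is k, in order.
theorem pv_bucket_getD (valid : List String) (key : String → String) (k : String) :
    (valid.foldl (fun d s => d.modify (key s) [] (fun l => l ++ [s])) PySem.Dict.empty).getD k []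
      = valid.filter (fun s => key s == k) := by
  have h := PySem.Dict.getD_foldl_modify_append (valid.map (fun s => (key s, s)))
      (PySem.Dict.empty) k
  rw [List.foldl_map] at h
  simpa [List.filter_map, Function.comp_def] using h

-- A's bucket keys are the distinct keys of the valid signs, in first-occurrence order.
theorem pv_bucket_keys (valid : List String) (key : String → String) :
    (valid.foldl (fun d s => d.modify (key s) [] (fun l => l ++ [s])) PySem.Dict.empty).keys
      = PySem.Set.ofList (valid.map key) := by
  rw [PySem.Dict.keys_foldl_modify_key valid key [] (fun _ s => (fun l => l ++ [s]))]
  rw [PySem.Dict.keys_empty]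
  rfl

-- A's label loop over the buckets of `field` equals B's pvLabels.
theorem pv_labels_eq (sign_info : List (String × List (String × String))) (valid : List String) (field : String) :
    (PySem.List.enumerate (PySem.List.sorted
        (valid.foldl (fun d s => d.modify (pvField sign_info field s) [] (fun l => l ++ [s])) PySem.Dict.empty).keys
        (fun x => x) false) 0).foldl
      (fun d p => ((valid.foldl (fun d s => d.modify (pvField sign_info field s) [] (fun l => l ++ [s])) PySem.Dict.empty).getD p.2 []).foldl
          (fun d s => d.insert s p.1) d)
      (PySem.Dict.empty : PySem.Dict String Int)
      = pvLabels sign_info valid field := by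
  unfold pvLabels
  rw [pv_bucket_keys]
  refine PySem.List.foldl_congr_mem _ _ _ _ ?_
  intro acc p _
  rw [pv_bucket_getD, ← PySem.List.foldl_if_eq_foldl_filter (fun s => pvField sign_info field s == p.2)]

theorem pv_main (signs : List String) (sign_info : List (String × List (String × String))) :
    build_japanese_ground_truth signs sign_info = build_japanese_ground_truth_alt signs sign_info := by
  simp only [build_japanese_ground_truth, build_japanese_ground_truth_alt]
  rw [show (fun (st : PySem.Dict String (List String) × PySem.Dict String (List String)) sign =>
        if (PySem.Dict.mk sign_info).contains sign then
          (st.1.modify (pvField sign_info "consonant" sign) [] (fun l => l ++ [sign]),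
           st.2.modify (pvField sign_info "vowel" sign) [] (fun l => l ++ [sign]))
        else st)
      = (fun st sign =>
        if ((PySem.Dict.mk sign_info).contains sign) = true then
          ((fun (d : PySem.Dict String (List String)) s => d.modify (pvField sign_info "consonant" s) [] (fun l => l ++ [s])) st.1 sign,
           (fun (d : PySem.Dict String (List String)) s => d.modify (pvField sign_info "vowel" s) [] (fun l => l ++ [s])) st.2 sign)
        else st) from rfl,
    PySem.List.foldl_if_eq_foldl_filter,
    PySem.List.foldl_prod_mk
      (f := fun (d : PySem.Dict String (List String)) s => d.modify (pvField sign_info "consonant" s) [] (fun l => l ++ [s]))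
      (g := fun (d : PySem.Dict String (List String)) s => d.modify (pvField sign_info "vowel" s) [] (fun l => l ++ [s]))]
  rw [pv_labels_eq, pv_labels_eq]

-- ===== VERDICT (by name: the statement is the Claim_ definition above) =====
theorem build_japanese_ground_truth_spec : Claim_equal_build_japanese_ground_truth := by
  intro signs sign_info _ _
  exact pv_main signs sign_info
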